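-- pv_equiv track=rewrite | github.com/Bakhtaki/Hackerrank | problem-solving/Absolute_Element_Sums.py | playingWithNumbers
-- ===== SOURCE A (Python) =====
-- from collections import Counter
--
-- def playingWithNumbers(arr, queries):
--     # Write your code here
--     # Seprate positive and negative numbers in the array
--     positive_numbers = [element for element in arr if element >= 0]
--     negative_numbers = [element for element in arr if element < 0]
--
--     # Size of each array
--     positive_size = len(positive_numbers)
--     negative_size = len(negative_numbers)
--
--     # Sort the arrays
--     positive = sorted(Counter(positive_numbers).items(), reverse=True)
--     negative = sorted(Counter(negative_numbers).items())
--
--     # Initialize the Totol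
--     total = sum(abs(element) for element in arr)
--
--     # Cumulative sum of queries
--     cumulative_sum = 0
--
--     # Loop through the queries
--     for query in queries:
--         # Add the query to the cumulative_sum
--         cumulative_sum += query
--
--         total += positive_size * query - negative_size * query
--
--         # Loop through the positive queries
--         if query > 0:
--             while negative_size > 0 and negative[-1][0] < cumulative_sum:
--                 (n, count) = negative.pop()
--                 positive.append((n, count))
--                 positive_size += count
--                 negative_size -= count
--                 total += abs(n + cumulative_sum) * count * 2
--         else:
--             while positive_size > 0 and positive[-1][0] > cumulative_sum:
--                 (p, count) = positive.pop()
--                 negative.append((p, count))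
--                 positive_size -= count
--                 negative_size += count
--                 total += abs(p + cumulative_sum) * count * 2
--         yield total
-- ===== SOURCE B (Python) =====
-- from collections import Counter
--
-- def playingWithNumbers(arr, queries):
--     # 3-state machine: A's two stacks are always either the initial sign split,
--     # or everything on one side; per query O(log n) via prefix sums + binary search.
--     neg_items = sorted(Counter([x for x in arr if x < 0]).items())
--     pos_items = sorted(Counter([x for x in arr if x >= 0]).items())
--     items = neg_items + pos_items            # ascending by value
--     m = len(items)
--     pc = [0] * (m + 1)
--     pvc = [0] * (m + 1)
--     for i, (v, c) in enumerate(items):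
--         pc[i + 1] = pc[i] + c
--         pvc[i + 1] = pvc[i] + v * c
--     n = pc[m]
--     nneg = sum(c for _, c in neg_items)
--     npos = n - nneg
--     k = len(neg_items)
--
--     def split(limit):
--         # number of items with value < limit
--         lo, hi = 0, m
--         while lo < hi:
--             mid = (lo + hi) // 2
--             if items[mid][0] < limit:
--                 lo = mid + 1
--             else:
--                 hi = mid
--         return lo
--
--     def abs_sum(i, j, cum):
--         # sum over items[i:j] of |v + cum| * c
--         t = min(max(split(-cum), i), j)
--         lowpart = (pvc[t] - pvc[i]) + cum * (pc[t] - pc[i])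
--         highpart = (pvc[j] - pvc[t]) + cum * (pc[j] - pc[t])
--         return highpart - lowpart
--
--     state = 0  # 0: initial split, 1: all on positive side, 2: all on negative side
--     total = abs_sum(0, m, 0)
--     cum = 0
--     out = []
--     for q in queries:
--         cum += q
--         if state == 0:
--             total += (npos - nneg) * q
--         elif state == 1:
--             total += n * q
--         else:
--             total += -n * q
--         if q > 0:
--             if state == 0:
--                 if neg_items and neg_items[-1][0] < cum:
--                     total += 2 * abs_sum(0, k, cum)
--                     state = 1
--             elif state == 2:
--                 if items and items[-1][0] < cum:
--                     total += 2 * abs_sum(0, m, cum)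
--                     state = 1
--         else:
--             if state == 0:
--                 if pos_items and pos_items[0][0] > cum:
--                     total += 2 * abs_sum(k, m, cum)
--                     state = 2
--             elif state == 1:
--                 if items and items[0][0] > cum:
--                     total += 2 * abs_sum(0, m, cum)
--                     state = 2
--         out.append(total)
--     return out
-- ===== Notes on version B (the rewrite author's own statement) =====
-- stated objective: faster
-- what changed: A simulates two sorted stacks popping elements one by one per query; B proves each pop-loop is all-or-nothing, so it replaces the stacks by a three-state machine (initial sign split / all on positive side / all on negative side) and computes each batch contribution in O(log n) with prefix sums and binary search.
import Mathlib
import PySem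

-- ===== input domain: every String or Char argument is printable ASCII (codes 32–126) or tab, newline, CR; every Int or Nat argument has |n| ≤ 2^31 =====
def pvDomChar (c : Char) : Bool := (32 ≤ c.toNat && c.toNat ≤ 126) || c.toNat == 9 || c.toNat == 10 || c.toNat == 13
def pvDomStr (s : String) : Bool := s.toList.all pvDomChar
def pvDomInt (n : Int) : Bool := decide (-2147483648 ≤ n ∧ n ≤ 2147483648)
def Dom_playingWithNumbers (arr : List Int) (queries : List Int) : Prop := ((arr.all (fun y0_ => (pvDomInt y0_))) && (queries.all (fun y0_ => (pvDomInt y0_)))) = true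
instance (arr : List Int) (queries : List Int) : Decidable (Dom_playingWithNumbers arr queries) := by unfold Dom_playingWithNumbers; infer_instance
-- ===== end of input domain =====

-- B replaces A's stack simulation by a three-state machine (A's two stacks are always either the
-- initial sign split or entirely on one side) with prefix sums and binary search per query.
-- ===== PORT A =====
-- while-loop of the `query > 0` branch: pop from the end of `negative` while its top value < cum
-- (the inner `if h : neg ≠ []` only guards the `negative[-1]` indexing, which A's loop condition keeps in range)
def negLoop (cum : Int) (neg pos : List (Int × Int)) (ps ns total : Int) :
    List (Int × Int) × List (Int × Int) × Int × Int × Int :=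
  if 0 < ns then
    if h : neg ≠ [] then
      if (neg.getLast h).1 < cum then
        negLoop cum neg.dropLast (pos ++ [neg.getLast h]) (ps + (neg.getLast h).2)
          (ns - (neg.getLast h).2) (total + |(neg.getLast h).1 + cum| * (neg.getLast h).2 * 2)
      else (neg, pos, ps, ns, total)
    else (neg, pos, ps, ns, total)
  else (neg, pos, ps, ns, total)
termination_by neg.length
decreasing_by
  have : 0 < neg.length := List.length_pos_iff.mpr h
  simp [List.length_dropLast]; omega

-- while-loop of the `query <= 0` branch: pop from the end of `positive` while its top value > cum
def posLoop (cum : Int) (neg pos : List (Int × Int)) (ps ns total : Int) :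
    List (Int × Int) × List (Int × Int) × Int × Int × Int :=
  if 0 < ps then
    if h : pos ≠ [] then
      if cum < (pos.getLast h).1 then
        posLoop cum (neg ++ [pos.getLast h]) pos.dropLast (ps - (pos.getLast h).2)
          (ns + (pos.getLast h).2) (total + |(pos.getLast h).1 + cum| * (pos.getLast h).2 * 2)
      else (neg, pos, ps, ns, total)
    else (neg, pos, ps, ns, total)
  else (neg, pos, ps, ns, total)
termination_by pos.length
decreasing_by
  have : 0 < pos.length := List.length_pos_iff.mpr h
  simp [List.length_dropLast]; omega

-- one iteration of A's `for query in queries` loop; state = (negative, positive, ps, ns, total, cum, out)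
def stepA (s : List (Int × Int) × List (Int × Int) × Int × Int × Int × Int × List Int) (q : Int) :
    List (Int × Int) × List (Int × Int) × Int × Int × Int × Int × List Int :=
  match s with
  | (neg, pos, ps, ns, total, cum, out) =>
    let cum' := cum + q
    let total' := total + ps * q - ns * q
    if 0 < q then
      match negLoop cum' neg pos ps ns total' with
      | (neg2, pos2, ps2, ns2, total2) => (neg2, pos2, ps2, ns2, total2, cum', out ++ [total2])
    else
      match posLoop cum' neg pos ps ns total' with
      | (neg2, pos2, ps2, ns2, total2) => (neg2, pos2, ps2, ns2, total2, cum', out ++ [total2])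

def playingWithNumbers (arr : List Int) (queries : List Int) : List Int :=
  let positive_numbers := arr.filter (fun e => decide (0 ≤ e))
  let negative_numbers := arr.filter (fun e => decide (e < 0))
  let positive_size : Int := positive_numbers.length
  let negative_size : Int := negative_numbers.length
  -- sorted(Counter(...).items(), reverse=...): pairs compare lexicographically -> sorted2
  let positive := PySem.List.sorted2 (PySem.Dict.counter positive_numbers).items Prod.fst Prod.snd true
  let negative := PySem.List.sorted2 (PySem.Dict.counter negative_numbers).items Prod.fst Prod.snd false
  let total := (arr.map (fun e => |e|)).sum
  (queries.foldl stepA (negative, positive, positive_size, negative_size, total, 0, [])).2.2.2.2.2.2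

-- ===== PORT B =====
-- Source B `split(limit)`: hand-written binary search, number of items with value < limit
def splitIdx (items : List (Int × Int)) (limit : Int) (lo hi : Nat) : Nat :=
  if lo < hi then
    match items[(lo + hi) / 2]? with
    | some p => if p.1 < limit then splitIdx items limit ((lo + hi) / 2 + 1) hi
                else splitIdx items limit lo ((lo + hi) / 2)
    | none => lo
  else lo
termination_by hi - lo
decreasing_by all_goals omega

-- Source B prefix-sum arrays pc, pvc (pc[i] = sum of counts of items[:i], pvc[i] = sum of v*c there)
def prefixes (items : List (Int × Int)) : List Int × List Int :=
  items.foldl (fun s p => (s.1 ++ [s.1.getLastD 0 + p.2], s.2 ++ [s.2.getLastD 0 + p.1 * p.2])) ([0], [0])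

-- Source B `abs_sum(i, j, cum)` body after the split point t is found: highpart - lowpart
def absSumAt (pc pvc : List Int) (i j : Nat) (cum : Int) (t : Nat) : Int :=
  ((pvc.getD j 0 - pvc.getD t 0) + cum * (pc.getD j 0 - pc.getD t 0)) -
    ((pvc.getD t 0 - pvc.getD i 0) + cum * (pc.getD t 0 - pc.getD i 0))

-- Source B `abs_sum(i, j, cum)`: sum of |v+cum|*c over items[i:j] via the prefix arrays
def absSum (items : List (Int × Int)) (pc pvc : List Int) (i j : Nat) (cum : Int) : Int :=
  absSumAt pc pvc i j cum (min (max (splitIdx items (-cum) 0 items.length) i) j)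

-- one iteration of Source B's query loop; state = (state, total, cum, out)
def stepB (negI posI items : List (Int × Int)) (pc pvc : List Int) (n nneg npos : Int) (k m : Nat)
    (s : Int × Int × Int × List Int) (q : Int) : Int × Int × Int × List Int :=
  match s with
  | (st, total, cum, out) =>
    let cum' := cum + q
    let total1 := total + (if st = 0 then npos - nneg else if st = 1 then n else -n) * q
    let r :=
      if 0 < q then
        if st = 0 then
          match negI.getLast? with
          | some p => if p.1 < cum' then (1, total1 + 2 * absSum items pc pvc 0 k cum') else (st, total1)
          | none => (st, total1)
        else if st = 2 then
          match items.getLast? with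
          | some p => if p.1 < cum' then (1, total1 + 2 * absSum items pc pvc 0 m cum') else (st, total1)
          | none => (st, total1)
        else (st, total1)
      else
        if st = 0 then
          match posI.head? with
          | some p => if cum' < p.1 then (2, total1 + 2 * absSum items pc pvc k m cum') else (st, total1)
          | none => (st, total1)
        else if st = 1 then
          match items.head? with
          | some p => if cum' < p.1 then (2, total1 + 2 * absSum items pc pvc 0 m cum') else (st, total1)
          | none => (st, total1)
        else (st, total1)
    (r.1, r.2, cum', out ++ [r.2])

def playingWithNumbers_alt (arr : List Int) (queries : List Int) : List Int :=
  let neg_items := PySem.List.sorted2 (PySem.Dict.counter (arr.filter (fun x => decide (x < 0)))).items Prod.fst Prod.snd false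
  let pos_items := PySem.List.sorted2 (PySem.Dict.counter (arr.filter (fun x => decide (0 ≤ x)))).items Prod.fst Prod.snd false
  let items := neg_items ++ pos_items
  let m := items.length
  let pcs := prefixes items
  let pc := pcs.1
  let pvc := pcs.2
  let n := pc.getD m 0
  let nneg := (neg_items.map Prod.snd).sum
  let npos := n - nneg
  let k := neg_items.length
  (queries.foldl (stepB neg_items pos_items items pc pvc n nneg npos k m)
      (0, absSum items pc pvc 0 m 0, 0, [])).2.2.2

-- ===== PRECONDITION & SPEC =====
def Spec_playingWithNumbers (arr : List Int) (queries : List Int) (out : List Int) : Prop := out = playingWithNumbers_alt arr queries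
instance (arr : List Int) (queries : List Int) (out : List Int) : Decidable (Spec_playingWithNumbers arr queries out) := by unfold Spec_playingWithNumbers; infer_instance

-- ===== CLAIM (what is proved, stated in full; the proofs are below) =====
def Claim_equal_playingWithNumbers : Prop := ∀ (arr : List Int) (queries : List Int), Dom_playingWithNumbers arr queries → Spec_playingWithNumbers arr queries (playingWithNumbers arr queries)

-- ===== LEMMAS AND PROOFS =====

-- sum of the counts of an item list
def cnts (L : List (Int × Int)) : Int := (L.map Prod.snd).sum
-- sum of value*count
def vsum (L : List (Int × Int)) : Int := (L.map (fun p => p.1 * p.2)).sum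
-- sum of |value + cum| * count
def aSum (cum : Int) (L : List (Int × Int)) : Int := (L.map (fun p => |p.1 + cum| * p.2)).sum

theorem cnts_append (L M : List (Int × Int)) : cnts (L ++ M) = cnts L + cnts M := by
  simp [cnts]

theorem vsum_append (L M : List (Int × Int)) : vsum (L ++ M) = vsum L + vsum M := by
  simp [vsum]

theorem aSum_append (cum : Int) (L M : List (Int × Int)) : aSum cum (L ++ M) = aSum cum L + aSum cum M := by
  simp [aSum]

theorem cnts_reverse (L : List (Int × Int)) : cnts L.reverse = cnts L := by
  unfold cnts
  exact List.Perm.sum_eq (List.Perm.map _ (List.reverse_perm L))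

theorem aSum_reverse (cum : Int) (L : List (Int × Int)) : aSum cum L.reverse = aSum cum L := by
  unfold aSum
  exact List.Perm.sum_eq (List.Perm.map _ (List.reverse_perm L))

theorem cnts_nonneg (L : List (Int × Int)) (hc : ∀ p ∈ L, 1 ≤ p.2) : 0 ≤ cnts L := by
  induction L with
  | nil => simp [cnts]
  | cons p t ih =>
    have h1 := hc p (List.mem_cons_self)
    have h2 := ih (fun x hx => hc x (List.mem_cons_of_mem _ hx))
    simp only [cnts, List.map_cons, List.sum_cons] at *
    omega

-- ===== all-or-nothing characterization of A's while loops =====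
theorem negLoop_nil (cum : Int) (pos : List (Int × Int)) (ps ns total : Int) :
    negLoop cum [] pos ps ns total = ([], pos, ps, ns, total) := by
  rw [negLoop]; simp

theorem negLoop_stay (cum : Int) (neg pos : List (Int × Int)) (ps ns total : Int)
    (hne : neg ≠ []) (hge : cum ≤ (neg.getLast hne).1) :
    negLoop cum neg pos ps ns total = (neg, pos, ps, ns, total) := by
  rw [negLoop]
  by_cases hns : 0 < ns
  · rw [if_pos hns, dif_pos hne, if_neg (not_lt.mpr hge)]
  · rw [if_neg hns]

theorem negLoop_pop (cum : Int) (neg pos : List (Int × Int)) (ps ns total : Int)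
    (hsort : neg.Pairwise (fun a b => a.1 < b.1)) (hc : ∀ p ∈ neg, 1 ≤ p.2)
    (hns : ns = cnts neg) (hne : neg ≠ []) (hlt : (neg.getLast hne).1 < cum) :
    negLoop cum neg pos ps ns total =
      ([], pos ++ neg.reverse, ps + ns, 0, total + 2 * aSum cum neg) := by
  induction neg using List.reverseRecOn generalizing pos ps ns total with
  | nil => exact absurd rfl hne
  | append_singleton ys y ih =>
    have hy2 : 1 ≤ y.2 := hc y (by simp)
    have hysc : ∀ p ∈ ys, 1 ≤ p.2 := fun p hp => hc p (by simp [hp])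
    have hns' : ns = cnts ys + y.2 := by
      rw [hns, cnts_append]; simp [cnts]
    have hcnt0 := cnts_nonneg ys hysc
    have hns0 : 0 < ns := by omega
    have hlast : (ys ++ [y]).getLast hne = y := by simp
    have hylt : y.1 < cum := by rw [hlast] at hlt; exact hlt
    rw [negLoop, if_pos hns0, dif_pos hne]
    simp only [hlast, List.dropLast_concat, if_pos hylt]
    by_cases hys : ys = []
    · subst hys
      have hz : cnts ([] : List (Int × Int)) = 0 := by simp [cnts]
      rw [show ns - y.2 = 0 by omega, negLoop, if_neg (by omega : ¬ (0:Int) < 0)]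
      have hnsy : ns = y.2 := by omega
      subst hnsy
      simp only [List.nil_append, List.reverse_cons, List.reverse_nil, aSum, List.map_cons,
        List.map_nil, List.sum_cons, List.sum_nil, Prod.mk.injEq, true_and, and_true]
      try ring
    · have hpa := List.pairwise_append.mp hsort
      have hcross : ∀ a ∈ ys, a.1 < y.1 := fun a ha => hpa.2.2 a ha y (by simp)
      have hylast : (ys.getLast hys).1 < cum :=
        lt_trans (hcross _ (List.getLast_mem hys)) hylt
      rw [ih (pos ++ [y]) (ps + y.2) (ns - y.2) _ hpa.1 hysc (by omega : ns - y.2 = cnts ys) hys hylast]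
      have hrev : pos ++ (ys ++ [y]).reverse = (pos ++ [y]) ++ ys.reverse := by
        simp [List.reverse_append]
      have hasum : aSum cum (ys ++ [y]) = aSum cum ys + |y.1 + cum| * y.2 := by
        rw [aSum_append]; simp [aSum]
      rw [hrev, hasum]
      simp only [Prod.mk.injEq, true_and, and_true]
      exact ⟨by omega, by ring⟩

theorem posLoop_nil (cum : Int) (neg : List (Int × Int)) (ps ns total : Int) :
    posLoop cum neg [] ps ns total = (neg, [], ps, ns, total) := by
  rw [posLoop]; simp

theorem posLoop_stay (cum : Int) (neg pos : List (Int × Int)) (ps ns total : Int)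
    (hne : pos ≠ []) (hle : (pos.getLast hne).1 ≤ cum) :
    posLoop cum neg pos ps ns total = (neg, pos, ps, ns, total) := by
  rw [posLoop]
  by_cases hps : 0 < ps
  · rw [if_pos hps, dif_pos hne, if_neg (not_lt.mpr hle)]
  · rw [if_neg hps]

theorem posLoop_pop (cum : Int) (neg pos : List (Int × Int)) (ps ns total : Int)
    (hsort : pos.Pairwise (fun a b => b.1 < a.1)) (hc : ∀ p ∈ pos, 1 ≤ p.2)
    (hps : ps = cnts pos) (hne : pos ≠ []) (hgt : cum < (pos.getLast hne).1) :
    posLoop cum neg pos ps ns total =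
      (neg ++ pos.reverse, [], 0, ns + ps, total + 2 * aSum cum pos) := by
  induction pos using List.reverseRecOn generalizing neg ps ns total with
  | nil => exact absurd rfl hne
  | append_singleton ys y ih =>
    have hy2 : 1 ≤ y.2 := hc y (by simp)
    have hysc : ∀ p ∈ ys, 1 ≤ p.2 := fun p hp => hc p (by simp [hp])
    have hps' : ps = cnts ys + y.2 := by
      rw [hps, cnts_append]; simp [cnts]
    have hcnt0 := cnts_nonneg ys hysc
    have hps0 : 0 < ps := by omega
    have hlast : (ys ++ [y]).getLast hne = y := by simp
    have hygt : cum < y.1 := by rw [hlast] at hgt; exact hgt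
    rw [posLoop, if_pos hps0, dif_pos hne]
    simp only [hlast, List.dropLast_concat, if_pos hygt]
    by_cases hys : ys = []
    · subst hys
      have hz : cnts ([] : List (Int × Int)) = 0 := by simp [cnts]
      rw [show ps - y.2 = 0 by omega, posLoop, if_neg (by omega : ¬ (0:Int) < 0)]
      have hpsy : ps = y.2 := by omega
      subst hpsy
      simp only [List.nil_append, List.reverse_cons, List.reverse_nil, aSum, List.map_cons,
        List.map_nil, List.sum_cons, List.sum_nil, Prod.mk.injEq, true_and, and_true]
      try ring
    · have hpa := List.pairwise_append.mp hsort
      have hcross : ∀ a ∈ ys, y.1 < a.1 := fun a ha => hpa.2.2 a ha y (by simp)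
      have hylast : cum < (ys.getLast hys).1 :=
        lt_trans hygt (hcross _ (List.getLast_mem hys))
      rw [ih (neg ++ [y]) (ps - y.2) (ns + y.2) _ hpa.1 hysc (by omega : ps - y.2 = cnts ys) hys hylast]
      have hrev : neg ++ (ys ++ [y]).reverse = (neg ++ [y]) ++ ys.reverse := by
        simp [List.reverse_append]
      have hasum : aSum cum (ys ++ [y]) = aSum cum ys + |y.1 + cum| * y.2 := by
        rw [aSum_append]; simp [aSum]
      rw [hrev, hasum]
      simp only [Prod.mk.injEq, true_and, and_true]
      exact ⟨by omega, by ring⟩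


-- ===== B's prefix arrays =====
theorem getLastD_map_range (f : Nat → Int) (n : Nat) :
    ((List.range (n + 1)).map f).getLastD 0 = f n := by
  rw [List.range_succ]
  simp

theorem prefixes_eq (items : List (Int × Int)) :
    prefixes items = ((List.range (items.length + 1)).map (fun i => cnts (items.take i)),
                      (List.range (items.length + 1)).map (fun i => vsum (items.take i))) := by
  induction items using List.reverseRecOn with
  | nil => simp [prefixes, cnts, vsum]
  | append_singleton ys y ih =>
    rw [prefixes, List.foldl_append] at *
    rw [ih]
    simp only [List.foldl_cons, List.foldl_nil]
    rw [getLastD_map_range, getLastD_map_range]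
    have hlen : (ys ++ [y]).length = ys.length + 1 := by simp
    rw [hlen]
    have hr : List.range (ys.length + 1 + 1) = List.range (ys.length + 1) ++ [ys.length + 1] :=
      List.range_succ
    rw [hr, List.map_append, List.map_append]
    have htk : ∀ g : List (Int × Int) → Int,
        (List.range (ys.length + 1)).map (fun i => g ((ys ++ [y]).take i)) =
        (List.range (ys.length + 1)).map (fun i => g (ys.take i)) := by
      intro g
      apply List.map_congr_left
      intro i hi
      rw [List.mem_range] at hi
      rw [List.take_append_of_le_length (by omega)]
    rw [htk, htk]
    have htake : (ys ++ [y]).take (ys.length + 1) = ys ++ [y] := by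
      apply List.take_of_length_le; simp
    have hc : cnts (ys.take ys.length) + y.2 = cnts ((ys ++ [y]).take (ys.length + 1)) := by
      rw [htake, List.take_length, cnts_append]; simp [cnts]
    have hv : vsum (ys.take ys.length) + y.1 * y.2 = vsum ((ys ++ [y]).take (ys.length + 1)) := by
      rw [htake, List.take_length, vsum_append]; simp [vsum]
    rw [hc, hv]
    simp

theorem getD_map_range (f : Nat → Int) (n i : Nat) (hi : i ≤ n) :
    (((List.range (n + 1)).map f).getD i 0) = f i := by
  have h : i < n + 1 := by omega
  rw [List.getD_eq_getElem?_getD]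
  simp [h]

theorem prefixes_fst_getD (items : List (Int × Int)) (i : Nat) (hi : i ≤ items.length) :
    (prefixes items).1.getD i 0 = cnts (items.take i) := by
  rw [prefixes_eq]
  exact getD_map_range _ _ _ hi

theorem prefixes_snd_getD (items : List (Int × Int)) (i : Nat) (hi : i ≤ items.length) :
    (prefixes items).2.getD i 0 = vsum (items.take i) := by
  rw [prefixes_eq]
  exact getD_map_range _ _ _ hi

-- ===== B's binary search =====
theorem fst_mono (items : List (Int × Int)) (hsort : items.Pairwise (fun a b => a.1 ≤ b.1))
    (i j : Nat) (hij : i ≤ j) (hj : j < items.length) :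
    items[i].1 ≤ items[j].1 := by
  rcases Nat.eq_or_lt_of_le hij with h | h
  · subst h; exact le_refl _
  · exact (List.pairwise_iff_getElem.mp hsort) i j (by omega) hj h

theorem splitIdx_go (items : List (Int × Int)) (limit : Int)
    (hsort : items.Pairwise (fun a b => a.1 ≤ b.1)) (fuel : Nat) :
    ∀ lo hi : Nat, hi - lo ≤ fuel → hi ≤ items.length → lo ≤ hi →
    (∀ j (hj : j < items.length), j < lo → items[j].1 < limit) →
    (∀ j (hj : j < items.length), hi ≤ j → limit ≤ items[j].1) →
    lo ≤ splitIdx items limit lo hi ∧ splitIdx items limit lo hi ≤ hi ∧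
      (∀ j (hj : j < items.length), j < splitIdx items limit lo hi → items[j].1 < limit) ∧
      (∀ j (hj : j < items.length), splitIdx items limit lo hi ≤ j → limit ≤ items[j].1) := by
  induction fuel with
  | zero =>
    intro lo hi hfuel hhi hlohi hlo hhi2
    have : lo = hi := by omega
    subst this
    rw [splitIdx, if_neg (by omega : ¬ lo < lo)]
    exact ⟨le_refl _, le_refl _, hlo, hhi2⟩
  | succ n ih =>
    intro lo hi hfuel hhi hlohi hlo hhi2
    rw [splitIdx]
    by_cases hlt : lo < hi
    · rw [if_pos hlt]
      have hmid1 : lo ≤ (lo + hi) / 2 := by omega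
      have hmid2 : (lo + hi) / 2 < hi := by omega
      have hmidlen : (lo + hi) / 2 < items.length := by omega
      rw [List.getElem?_eq_getElem hmidlen]
      simp only []
      by_cases hv : items[(lo + hi) / 2].1 < limit
      · rw [if_pos hv]
        have h1 : ∀ j (hj : j < items.length), j < (lo + hi) / 2 + 1 → items[j].1 < limit := by
          intro j hj hjm
          exact lt_of_le_of_lt (fst_mono items hsort j ((lo + hi) / 2) (by omega) hmidlen) hv
        have := ih ((lo + hi) / 2 + 1) hi (by omega) hhi (by omega) h1 hhi2
        exact ⟨by omega, this.2.1, this.2.2.1, this.2.2.2⟩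
      · rw [if_neg hv]
        have h2 : ∀ j (hj : j < items.length), (lo + hi) / 2 ≤ j → limit ≤ items[j].1 := by
          intro j hj hjm
          exact le_trans (not_lt.mp hv) (fst_mono items hsort ((lo + hi) / 2) j hjm hj)
        have := ih lo ((lo + hi) / 2) (by omega) (by omega) (by omega) hlo h2
        exact ⟨this.1, by omega, this.2.2.1, this.2.2.2⟩
    · rw [if_neg hlt]
      have : lo = hi := by omega
      subst this
      exact ⟨le_refl _, le_refl _, hlo, hhi2⟩

theorem splitIdx_spec (items : List (Int × Int)) (limit : Int)
    (hsort : items.Pairwise (fun a b => a.1 ≤ b.1)) :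
    splitIdx items limit 0 items.length ≤ items.length ∧
      (∀ j (hj : j < items.length), j < splitIdx items limit 0 items.length → items[j].1 < limit) ∧
      (∀ j (hj : j < items.length), splitIdx items limit 0 items.length ≤ j → limit ≤ items[j].1) := by
  have := splitIdx_go items limit hsort items.length 0 items.length (by omega) (le_refl _)
    (by omega) (by intro j hj h; omega) (by intro j hj h; omega)
  exact ⟨this.2.1, this.2.2.1, this.2.2.2⟩

-- ===== segments of the item list =====
theorem take_split (items : List (Int × Int)) (a b : Nat) (hab : a ≤ b) :
    items.take b = items.take a ++ (items.drop a).take (b - a) := by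
  rw [show b = a + (b - a) by omega, List.take_add]
  simp

theorem seg_append (items : List (Int × Int)) (a b c : Nat) (hab : a ≤ b) (hbc : b ≤ c) :
    (items.drop a).take (c - a) = ((items.drop a).take (b - a)) ++ ((items.drop b).take (c - b)) := by
  rw [show c - a = (b - a) + (c - b) by omega, List.take_add, List.drop_drop,
    show a + (b - a) = b by omega]

theorem mem_seg (items : List (Int × Int)) (a c : Nat) {p : Int × Int}
    (hp : p ∈ (items.drop a).take c) :
    ∃ idx, a ≤ idx ∧ idx < a + c ∧ ∃ h : idx < items.length, items[idx] = p := by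
  obtain ⟨n, hn, hval⟩ := List.getElem_of_mem hp
  have hlen : (List.take c (List.drop a items)).length = min c (items.length - a) := by simp
  rw [hlen] at hn
  have hn1 : n < c := by omega
  have hn3 : a + n < items.length := by omega
  refine ⟨a + n, by omega, by omega, hn3, ?_⟩
  rw [← hval]
  simp [List.getElem_take, List.getElem_drop]

theorem vc_sum (cum : Int) (L : List (Int × Int)) :
    vsum L + cum * cnts L = (L.map (fun p => (p.1 + cum) * p.2)).sum := by
  induction L with
  | nil => simp [vsum, cnts]
  | cons p t ih =>
    simp only [vsum, cnts, List.map_cons, List.sum_cons] at *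
    ring_nf
    ring_nf at ih
    omega

theorem sum_map_neg (L : List (Int × Int)) (g : Int × Int → Int) :
    (L.map (fun p => -(g p))).sum = -((L.map g).sum) := by
  induction L with
  | nil => simp
  | cons p t ih => simp [ih]; ring

theorem absSum_spec (items : List (Int × Int)) (hsort : items.Pairwise (fun a b => a.1 < b.1))
    (i j : Nat) (hij : i ≤ j) (hj : j ≤ items.length) (cum : Int) :
    absSum items (prefixes items).1 (prefixes items).2 i j cum =
      aSum cum ((items.drop i).take (j - i)) := by
  have hsle : items.Pairwise (fun a b => a.1 ≤ b.1) := hsort.imp le_of_lt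
  obtain ⟨ht1, ht2, ht3⟩ := splitIdx_spec items (-cum) hsle
  rw [absSum, absSumAt]
  set t0 := splitIdx items (-cum) 0 items.length with ht0
  set t := min (max t0 i) j with htdef
  have hti : i ≤ t := by omega
  have htj : t ≤ j := by omega
  rw [prefixes_fst_getD items t (by omega), prefixes_fst_getD items i (by omega),
      prefixes_fst_getD items j (by omega), prefixes_snd_getD items t (by omega),
      prefixes_snd_getD items i (by omega), prefixes_snd_getD items j (by omega)]
  have hct : cnts (items.take t) = cnts (items.take i) + cnts ((items.drop i).take (t - i)) := by
    rw [take_split items i t hti, cnts_append]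
  have hcj : cnts (items.take j) = cnts (items.take t) + cnts ((items.drop t).take (j - t)) := by
    rw [take_split items t j htj, cnts_append]
  have hvt : vsum (items.take t) = vsum (items.take i) + vsum ((items.drop i).take (t - i)) := by
    rw [take_split items i t hti, vsum_append]
  have hvj : vsum (items.take j) = vsum (items.take t) + vsum ((items.drop t).take (j - t)) := by
    rw [take_split items t j htj, vsum_append]
  have hseg : (items.drop i).take (j - i) =
      ((items.drop i).take (t - i)) ++ ((items.drop t).take (j - t)) :=
    seg_append items i t j hti htj
  -- low segment: every element has value < -cum
  have hlow : aSum cum ((items.drop i).take (t - i)) =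
      -(((items.drop i).take (t - i)).map (fun p => (p.1 + cum) * p.2)).sum := by
    rw [← sum_map_neg]
    unfold aSum
    apply congrArg
    apply List.map_congr_left
    intro p hp
    obtain ⟨idx, hidx1, hidx2, hidxlen, hidxval⟩ := mem_seg items i (t - i) hp
    have hidxt : idx < t0 := by omega
    have := ht2 idx hidxlen hidxt
    rw [hidxval] at this
    have habs : |p.1 + cum| = -(p.1 + cum) := abs_of_neg (by omega)
    rw [habs]; ring
  -- high segment: every element has value ≥ -cum
  have hhigh : aSum cum ((items.drop t).take (j - t)) =
      (((items.drop t).take (j - t)).map (fun p => (p.1 + cum) * p.2)).sum := by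
    unfold aSum
    apply congrArg
    apply List.map_congr_left
    intro p hp
    obtain ⟨idx, hidx1, hidx2, hidxlen, hidxval⟩ := mem_seg items t (j - t) hp
    have hidxt : t0 ≤ idx := by omega
    have := ht3 idx hidxlen hidxt
    rw [hidxval] at this
    have habs : |p.1 + cum| = p.1 + cum := abs_of_nonneg (by omega)
    rw [habs]
  have e1 := vc_sum cum ((items.drop i).take (t - i))
  have e2 := vc_sum cum ((items.drop t).take (j - t))
  rw [hcj, hct, hvj, hvt, hseg, aSum_append, hlow, hhigh]
  linear_combination e2 - e1

-- ===== sorted2 on a list with distinct first components is sort-by-first =====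
theorem insertBy_perm (before : (Int × Int) → (Int × Int) → Bool) (x : Int × Int)
    (ys : List (Int × Int)) : (PySem.List.insertBy before x ys).Perm (x :: ys) := by
  induction ys with
  | nil => simp [PySem.List.insertBy]
  | cons y t ih =>
    rw [PySem.List.insertBy]
    by_cases h : before x y = true
    · rw [if_pos h]
    · rw [if_neg h]
      exact (ih.cons y).trans (List.Perm.swap x y t)

theorem insertBy_congr (p q : (Int × Int) → (Int × Int) → Bool) (x : Int × Int)
    (acc : List (Int × Int)) (h : ∀ y ∈ acc, p x y = q x y) :
    PySem.List.insertBy p x acc = PySem.List.insertBy q x acc := by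
  induction acc with
  | nil => rfl
  | cons y t ih =>
    rw [PySem.List.insertBy, PySem.List.insertBy, h y (by simp)]
    by_cases hq : q x y = true
    · rw [if_pos hq, if_pos hq]
    · rw [if_neg hq, if_neg hq, ih (fun z hz => h z (by simp [hz]))]

theorem foldl_insertBy_congr (p q : (Int × Int) → (Int × Int) → Bool)
    (hpq : ∀ a b : Int × Int, a.1 ≠ b.1 → p a b = q a b) :
    ∀ (xs acc : List (Int × Int)), ((acc ++ xs).map Prod.fst).Nodup →
    xs.foldl (fun acc x => PySem.List.insertBy p x acc) acc =
      xs.foldl (fun acc x => PySem.List.insertBy q x acc) acc := by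
  intro xs
  induction xs with
  | nil => intro acc _; rfl
  | cons x t ih =>
    intro acc hnd
    have hx : ∀ y ∈ acc, p x y = q x y := by
      intro y hy
      apply hpq
      intro hfst
      rw [List.map_append, List.nodup_append] at hnd
      exact (hnd.2.2 y.1 (List.mem_map_of_mem hy) x.1
        (List.mem_map_of_mem List.mem_cons_self)) hfst.symm
    simp only [List.foldl_cons]
    rw [insertBy_congr p q x acc hx]
    apply ih
    have hperm : ((PySem.List.insertBy q x acc) ++ t).Perm (acc ++ x :: t) := by
      refine ((insertBy_perm q x acc).append_right t).trans ?_
      simpa using List.perm_middle.symm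
    exact ((hperm.map Prod.fst).nodup_iff).mpr hnd

theorem sorted2_eq_sorted (xs : List (Int × Int)) (h : (xs.map Prod.fst).Nodup) (rev : Bool) :
    PySem.List.sorted2 xs Prod.fst Prod.snd rev = PySem.List.sorted xs Prod.fst rev := by
  cases rev
  · rw [PySem.List.sorted_eq_foldl_insertBy]
    rw [PySem.List.sorted2]
    simp only [Bool.false_eq_true, if_false]
    exact foldl_insertBy_congr _ _
      (by
        intro a b hne
        by_cases hab : a.1 < b.1
        · simp [hab]
        · have hba : b.1 < a.1 := by omega
          simp [hab, hba])
      xs [] (by simpa using h)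
  · rw [PySem.List.sorted_rev_eq_foldl_insertBy]
    rw [PySem.List.sorted2]
    simp only [if_true]
    exact foldl_insertBy_congr _ _
      (by
        intro a b hne
        by_cases hab : b.1 < a.1
        · simp [hab]
        · have hba : a.1 < b.1 := by omega
          simp [hab, hba])
      xs [] (by simpa using h)

theorem pairwise_lt_of_sorted (xs : List (Int × Int)) (h : (xs.map Prod.fst).Nodup) :
    (PySem.List.sorted xs Prod.fst false).Pairwise (fun a b : Int × Int => a.1 < b.1) := by
  have hle : (PySem.List.sorted xs Prod.fst false).Pairwise (fun a b : Int × Int => a.1 ≤ b.1) :=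
    PySem.List.sorted_pairwise xs Prod.fst
  have hnd : ((PySem.List.sorted xs Prod.fst false).map Prod.fst).Nodup :=
    (((PySem.List.sorted_perm xs Prod.fst false).map Prod.fst).nodup_iff).mpr h
  have hne : (PySem.List.sorted xs Prod.fst false).Pairwise (fun a b : Int × Int => a.1 ≠ b.1) :=
    List.pairwise_map.mp hnd
  exact (hle.and hne).imp (fun h => lt_of_le_of_ne h.1 h.2)

theorem sorted_rev_eq_reverse (xs : List (Int × Int)) (h : (xs.map Prod.fst).Nodup) :
    PySem.List.sorted xs Prod.fst true = (PySem.List.sorted xs Prod.fst false).reverse := by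
  apply PySem.List.sorted_rev_eq_of_perm_of_pairwise_gt
  · exact (List.reverse_perm _).trans (PySem.List.sorted_perm xs Prod.fst false)
  · exact List.pairwise_reverse.mpr (pairwise_lt_of_sorted xs h)

-- ===== counter facts =====
theorem counter_fst_nodup (xs : List Int) :
    (((PySem.Dict.counter xs).items).map Prod.fst).Nodup := by
  rw [PySem.Dict.items_counter, List.map_map]
  have : (Prod.fst ∘ fun k => (k, (xs.count k : Int))) = id := by
    funext k; rfl
  rw [this, List.map_id]
  exact PySem.Set.nodup_ofList xs

theorem sum_f_counter (xs : List Int) (f : Int → Int) :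
    (((PySem.Dict.counter xs).items).map (fun p => f p.1 * p.2)).sum = (xs.map f).sum := by
  rw [PySem.Dict.items_counter, List.map_map]
  have hnd : (PySem.Set.ofList xs).Nodup := PySem.Set.nodup_ofList xs
  rw [← List.sum_toFinset _ hnd]
  have hfin : (PySem.Set.ofList xs).toFinset = xs.toFinset := by
    apply Finset.ext
    intro a
    simp [List.mem_toFinset, PySem.Set.mem_ofList]
  rw [hfin, Finset.sum_list_map_count]
  apply Finset.sum_congr rfl
  intro k _
  simp only [Function.comp]
  rw [nsmul_eq_mul]
  ring

-- ===== the three-state invariant between A's and B's loop states =====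
def PVRel (N0 P0asc : List (Int × Int))
    (sA : List (Int × Int) × List (Int × Int) × Int × Int × Int × Int × List Int)
    (sB : Int × Int × Int × List Int) : Prop :=
  sA.2.2.2.2.1 = sB.2.1 ∧ sA.2.2.2.2.2.1 = sB.2.2.1 ∧ sA.2.2.2.2.2.2 = sB.2.2.2 ∧
  ((sB.1 = 0 ∧ N0 = sA.1 ∧ P0asc.reverse = sA.2.1 ∧ cnts P0asc = sA.2.2.1 ∧ cnts N0 = sA.2.2.2.1) ∨
   (sB.1 = 1 ∧ ([] : List (Int × Int)) = sA.1 ∧ (N0 ++ P0asc).reverse = sA.2.1 ∧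
     cnts N0 + cnts P0asc = sA.2.2.1 ∧ (0 : Int) = sA.2.2.2.1) ∨
   (sB.1 = 2 ∧ N0 ++ P0asc = sA.1 ∧ ([] : List (Int × Int)) = sA.2.1 ∧
     (0 : Int) = sA.2.2.1 ∧ cnts N0 + cnts P0asc = sA.2.2.2.1))

theorem step_rel (N0 P0asc : List (Int × Int))
    (hsN : N0.Pairwise (fun a b => a.1 < b.1)) (hsP : P0asc.Pairwise (fun a b => a.1 < b.1))
    (hcN : ∀ p ∈ N0, 1 ≤ p.2) (hcP : ∀ p ∈ P0asc, 1 ≤ p.2)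
    (hkN : ∀ p ∈ N0, p.1 < 0) (hkP : ∀ p ∈ P0asc, 0 ≤ p.1)
    (sA : List (Int × Int) × List (Int × Int) × Int × Int × Int × Int × List Int)
    (sB : Int × Int × Int × List Int) (q : Int) (hrel : PVRel N0 P0asc sA sB) :
    PVRel N0 P0asc (stepA sA q)
      (stepB N0 P0asc (N0 ++ P0asc) (prefixes (N0 ++ P0asc)).1 (prefixes (N0 ++ P0asc)).2
        (cnts N0 + cnts P0asc) (cnts N0) (cnts P0asc) N0.length (N0 ++ P0asc).length sB q) := by
  have hsAll : (N0 ++ P0asc).Pairwise (fun a b : Int × Int => a.1 < b.1) := by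
    rw [List.pairwise_append]
    exact ⟨hsN, hsP, fun a ha b hb => lt_of_lt_of_le (hkN a ha) (hkP b hb)⟩
  have hcAll : ∀ p ∈ N0 ++ P0asc, 1 ≤ p.2 := by
    intro p hp
    rcases List.mem_append.mp hp with h | h
    · exact hcN p h
    · exact hcP p h
  have habs0 : ∀ (i j : Nat) (c : Int), i ≤ j → j ≤ (N0 ++ P0asc).length →
      absSum (N0 ++ P0asc) (prefixes (N0 ++ P0asc)).1 (prefixes (N0 ++ P0asc)).2 i j c =
        aSum c (((N0 ++ P0asc).drop i).take (j - i)) :=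
    fun i j c hij hj => absSum_spec (N0 ++ P0asc) hsAll i j hij hj c
  have hsegN : ((N0 ++ P0asc).drop 0).take (N0.length - 0) = N0 := by
    simp [List.take_left]
  have hsegP : ((N0 ++ P0asc).drop N0.length).take ((N0 ++ P0asc).length - N0.length) = P0asc := by
    rw [List.drop_left]
    rw [show (N0 ++ P0asc).length - N0.length = P0asc.length by simp]
    exact List.take_length
  have hsegA : ((N0 ++ P0asc).drop 0).take ((N0 ++ P0asc).length - 0) = N0 ++ P0asc := by
    simp [List.take_length]
  obtain ⟨neg, pos, ps, ns, total, cum, out⟩ := sA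
  obtain ⟨st, totalB, cumB, outB⟩ := sB
  unfold PVRel at hrel ⊢
  obtain ⟨ht, hcum, hout, hcase⟩ := hrel
  simp only [] at ht hcum hout
  subst ht hcum hout
  rcases hcase with ⟨hst, hneg, hpos, hps, hns⟩ | ⟨hst, hneg, hpos, hps, hns⟩ | ⟨hst, hneg, hpos, hps, hns⟩ <;>
    simp only [] at hst hneg hpos hps hns <;> subst hst hneg hpos hps hns
  -- ===== state 0 =====
  · by_cases hq : 0 < q
    · simp only [stepA, stepB, if_pos hq, Int.reduceEq, reduceIte]
      by_cases hN : N0 = []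
      · subst hN
        rw [negLoop_nil]
        simp only [List.getLast?_nil]
        exact ⟨by ring, by trivial, congrArg (fun z => out ++ [z]) (by ring),
          Or.inl ⟨by trivial, by trivial, by trivial, by trivial, by trivial⟩⟩
      · rw [List.getLast?_eq_some_getLast hN]
        simp only []
        by_cases hlt : (N0.getLast hN).1 < cum + q
        · rw [negLoop_pop (cum + q) N0 P0asc.reverse (cnts P0asc) (cnts N0) _ hsN hcN rfl hN hlt,
            if_pos hlt, habs0 0 N0.length (cum + q) (by omega) (by simp), hsegN]
          exact ⟨by ring, by trivial, congrArg (fun z => out ++ [z]) (by ring),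
            Or.inr (Or.inl ⟨by trivial, by trivial, by rw [List.reverse_append], by ring, by ring⟩)⟩
        · rw [negLoop_stay (cum + q) N0 P0asc.reverse (cnts P0asc) (cnts N0) _ hN (not_lt.mp hlt),
            if_neg hlt]
          exact ⟨by ring, by trivial, congrArg (fun z => out ++ [z]) (by ring),
            Or.inl ⟨by trivial, by trivial, by trivial, by trivial, by trivial⟩⟩
    · simp only [stepA, stepB, if_neg hq, Int.reduceEq, reduceIte]
      by_cases hP : P0asc = []
      · subst hP
        simp only [List.reverse_nil, List.head?_nil]
        rw [posLoop_nil]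
        exact ⟨by ring, by trivial, congrArg (fun z => out ++ [z]) (by ring),
          Or.inl ⟨by trivial, by trivial, by trivial, by trivial, by trivial⟩⟩
      · have hPr : P0asc.reverse ≠ [] := by simp [hP]
        have hgl : (P0asc.reverse).getLast hPr = P0asc.head hP := List.getLast_reverse _
        rw [List.head?_eq_some_head hP]
        simp only []
        by_cases hgt : cum + q < (P0asc.head hP).1
        · rw [posLoop_pop (cum + q) N0 P0asc.reverse (cnts P0asc) (cnts N0) _
            (List.pairwise_reverse.mpr hsP) (fun p hp => hcP p (List.mem_reverse.mp hp))
            (cnts_reverse P0asc).symm hPr (by rw [hgl]; exact hgt),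
            if_pos hgt, habs0 N0.length (N0 ++ P0asc).length (cum + q) (by simp) (le_refl _), hsegP]
          exact ⟨by rw [aSum_reverse]; ring, by trivial,
            congrArg (fun z => out ++ [z]) (by rw [aSum_reverse]; ring),
            Or.inr (Or.inr ⟨by trivial, by rw [List.reverse_reverse], by trivial, by trivial, by ring⟩)⟩
        · rw [posLoop_stay (cum + q) N0 P0asc.reverse (cnts P0asc) (cnts N0) _ hPr
            (by rw [hgl]; exact not_lt.mp hgt), if_neg hgt]
          exact ⟨by ring, by trivial, congrArg (fun z => out ++ [z]) (by ring),
            Or.inl ⟨by trivial, by trivial, by trivial, by trivial, by trivial⟩⟩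
  -- ===== state 1 : everything on the positive side =====
  · by_cases hq : 0 < q
    · simp only [stepA, stepB, if_pos hq, Int.reduceEq, reduceIte]
      rw [negLoop_nil]
      exact ⟨by ring, by trivial, congrArg (fun z => out ++ [z]) (by ring),
        Or.inr (Or.inl ⟨by trivial, by trivial, by trivial, by trivial, by trivial⟩)⟩
    · simp only [stepA, stepB, if_neg hq, Int.reduceEq, reduceIte]
      by_cases hA : N0 ++ P0asc = []
      · rw [hA]
        simp only [List.reverse_nil, List.head?_nil]
        rw [posLoop_nil]
        exact ⟨by ring, by trivial, congrArg (fun z => out ++ [z]) (by ring),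
          Or.inr (Or.inl ⟨by trivial, by trivial, by trivial, by trivial, by trivial⟩)⟩
      · have hAr : (N0 ++ P0asc).reverse ≠ [] := by
          intro h
          rw [List.reverse_eq_nil_iff] at h
          exact hA h
        have hgl : ((N0 ++ P0asc).reverse).getLast hAr = (N0 ++ P0asc).head hA :=
          List.getLast_reverse _
        rw [List.head?_eq_some_head hA]
        simp only []
        by_cases hgt : cum + q < ((N0 ++ P0asc).head hA).1
        · rw [posLoop_pop (cum + q) [] ((N0 ++ P0asc).reverse) (cnts N0 + cnts P0asc) 0 _
            (List.pairwise_reverse.mpr hsAll) (fun p hp => hcAll p (List.mem_reverse.mp hp))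
            (by rw [cnts_reverse, cnts_append]) hAr (by rw [hgl]; exact hgt),
            if_pos hgt, habs0 0 (N0 ++ P0asc).length (cum + q) (by omega) (le_refl _), hsegA]
          exact ⟨by rw [aSum_reverse]; ring, by trivial,
            congrArg (fun z => out ++ [z]) (by rw [aSum_reverse]; ring),
            Or.inr (Or.inr ⟨by trivial, by rw [List.reverse_reverse]; simp, by trivial, by trivial, by ring⟩)⟩
        · rw [posLoop_stay (cum + q) [] ((N0 ++ P0asc).reverse) (cnts N0 + cnts P0asc) 0 _ hAr
            (by rw [hgl]; exact not_lt.mp hgt), if_neg hgt]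
          exact ⟨by ring, by trivial, congrArg (fun z => out ++ [z]) (by ring),
            Or.inr (Or.inl ⟨by trivial, by trivial, by trivial, by trivial, by trivial⟩)⟩
  -- ===== state 2 : everything on the negative side =====
  · by_cases hq : 0 < q
    · simp only [stepA, stepB, if_pos hq, Int.reduceEq, reduceIte]
      by_cases hA : N0 ++ P0asc = []
      · rw [hA]
        rw [negLoop_nil]
        simp only [List.getLast?_nil]
        exact ⟨by ring, by trivial, congrArg (fun z => out ++ [z]) (by ring),
          Or.inr (Or.inr ⟨by trivial, by trivial, by trivial, by trivial, by trivial⟩)⟩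
      · rw [List.getLast?_eq_some_getLast hA]
        simp only []
        by_cases hlt : ((N0 ++ P0asc).getLast hA).1 < cum + q
        · rw [negLoop_pop (cum + q) (N0 ++ P0asc) [] 0 (cnts N0 + cnts P0asc) _
            hsAll hcAll (cnts_append _ _).symm hA hlt,
            if_pos hlt, habs0 0 (N0 ++ P0asc).length (cum + q) (by omega) (le_refl _), hsegA]
          exact ⟨by ring, by trivial, congrArg (fun z => out ++ [z]) (by ring),
            Or.inr (Or.inl ⟨by trivial, by trivial, by simp, by ring, by ring⟩)⟩
        · rw [negLoop_stay (cum + q) (N0 ++ P0asc) [] 0 (cnts N0 + cnts P0asc) _ hA (not_lt.mp hlt),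
            if_neg hlt]
          exact ⟨by ring, by trivial, congrArg (fun z => out ++ [z]) (by ring),
            Or.inr (Or.inr ⟨by trivial, by trivial, by trivial, by trivial, by trivial⟩)⟩
    · simp only [stepA, stepB, if_neg hq, Int.reduceEq, reduceIte]
      rw [posLoop_nil]
      exact ⟨by ring, by trivial, congrArg (fun z => out ++ [z]) (by ring),
        Or.inr (Or.inr ⟨by trivial, by trivial, by trivial, by trivial, by trivial⟩)⟩

theorem foldl_rel (N0 P0asc : List (Int × Int))
    (hsN : N0.Pairwise (fun a b => a.1 < b.1)) (hsP : P0asc.Pairwise (fun a b => a.1 < b.1))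
    (hcN : ∀ p ∈ N0, 1 ≤ p.2) (hcP : ∀ p ∈ P0asc, 1 ≤ p.2)
    (hkN : ∀ p ∈ N0, p.1 < 0) (hkP : ∀ p ∈ P0asc, 0 ≤ p.1)
    (queries : List Int)
    (sA : List (Int × Int) × List (Int × Int) × Int × Int × Int × Int × List Int)
    (sB : Int × Int × Int × List Int) (hrel : PVRel N0 P0asc sA sB) :
    PVRel N0 P0asc (queries.foldl stepA sA)
      (queries.foldl (stepB N0 P0asc (N0 ++ P0asc) (prefixes (N0 ++ P0asc)).1 (prefixes (N0 ++ P0asc)).2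
        (cnts N0 + cnts P0asc) (cnts N0) (cnts P0asc) N0.length (N0 ++ P0asc).length) sB) := by
  induction queries generalizing sA sB with
  | nil => exact hrel
  | cons q t ih =>
    simp only [List.foldl_cons]
    exact ih _ _ (step_rel N0 P0asc hsN hsP hcN hcP hkN hkP sA sB q hrel)

-- ===== instantiation facts about sorted2(Counter(...).items()) =====
theorem sorted2_counter_pairwise (xs : List Int) :
    (PySem.List.sorted2 (PySem.Dict.counter xs).items Prod.fst Prod.snd false).Pairwise
      (fun a b : Int × Int => a.1 < b.1) := by
  rw [sorted2_eq_sorted _ (counter_fst_nodup xs)]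
  exact pairwise_lt_of_sorted _ (counter_fst_nodup xs)

theorem mem_sorted2_counter (xs : List Int) {p : Int × Int}
    (hp : p ∈ PySem.List.sorted2 (PySem.Dict.counter xs).items Prod.fst Prod.snd false) :
    p.1 ∈ xs ∧ p.2 = (xs.count p.1 : Int) := by
  have hmem : p ∈ (PySem.Dict.counter xs).items :=
    (PySem.List.sorted2_perm (PySem.Dict.counter xs).items Prod.fst Prod.snd false).mem_iff.mp hp
  rw [PySem.Dict.items_counter] at hmem
  obtain ⟨k, hk, rfl⟩ := List.mem_map.mp hmem
  exact ⟨(PySem.Set.mem_ofList xs k).mp hk, rfl⟩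

theorem sorted2_counter_counts (xs : List Int) :
    ∀ p ∈ PySem.List.sorted2 (PySem.Dict.counter xs).items Prod.fst Prod.snd false, 1 ≤ p.2 := by
  intro p hp
  obtain ⟨hmem, hcnt⟩ := mem_sorted2_counter xs hp
  have : 0 < xs.count p.1 := List.count_pos_iff.mpr hmem
  omega

theorem sum_ones (xs : List Int) : (xs.map (fun _ => (1 : Int))).sum = (xs.length : Int) := by
  induction xs with
  | nil => simp
  | cons x t ih => simp [ih]; omega

theorem cnts_sorted2_counter (xs : List Int) :
    cnts (PySem.List.sorted2 (PySem.Dict.counter xs).items Prod.fst Prod.snd false) =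
      (xs.length : Int) := by
  unfold cnts
  rw [List.Perm.sum_eq ((PySem.List.sorted2_perm (PySem.Dict.counter xs).items
    Prod.fst Prod.snd false).map Prod.snd)]
  have h1 := sum_f_counter xs (fun _ => 1)
  simp only [one_mul] at h1
  rw [← sum_ones xs, ← h1]

theorem aSum_sorted2_counter (xs : List Int) (cum : Int) :
    aSum cum (PySem.List.sorted2 (PySem.Dict.counter xs).items Prod.fst Prod.snd false) =
      (xs.map (fun x => |x + cum|)).sum := by
  unfold aSum
  rw [List.Perm.sum_eq ((PySem.List.sorted2_perm (PySem.Dict.counter xs).items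
    Prod.fst Prod.snd false).map _)]
  exact sum_f_counter xs (fun v => |v + cum|)

theorem neg_keys (arr : List Int) :
    ∀ p ∈ PySem.List.sorted2 (PySem.Dict.counter (arr.filter (fun x => decide (x < 0)))).items
      Prod.fst Prod.snd false, p.1 < 0 := by
  intro p hp
  have := (mem_sorted2_counter _ hp).1
  have := List.of_mem_filter this
  simpa using this

theorem pos_keys (arr : List Int) :
    ∀ p ∈ PySem.List.sorted2 (PySem.Dict.counter (arr.filter (fun x => decide (0 ≤ x)))).items
      Prod.fst Prod.snd false, 0 ≤ p.1 := by
  intro p hp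
  have := (mem_sorted2_counter _ hp).1
  have := List.of_mem_filter this
  simpa using this

theorem map_sum_filter_split (arr : List Int) (f : Int → Int) :
    ((arr.filter (fun x => decide (x < 0))).map f).sum +
      ((arr.filter (fun x => decide (0 ≤ x))).map f).sum = (arr.map f).sum := by
  have hnot : (fun x : Int => decide (0 ≤ x)) = (fun x : Int => !decide (x < 0)) := by
    funext x
    by_cases h : x < 0 <;> simp [h] <;> omega
  rw [hnot, ← List.sum_append, ← List.map_append]
  exact (List.Perm.map f (List.filter_append_perm _ arr)).sum_eq

-- ===== VERDICT (by name: the statement is the Claim_ definition above) =====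
theorem playingWithNumbers_spec : Claim_equal_playingWithNumbers := by
  unfold Claim_equal_playingWithNumbers
  intro arr queries _
  unfold Spec_playingWithNumbers playingWithNumbers playingWithNumbers_alt
  simp only []
  set NI := PySem.List.sorted2 (PySem.Dict.counter (arr.filter (fun x => decide (x < 0)))).items
    Prod.fst Prod.snd false with hNI
  set PI := PySem.List.sorted2 (PySem.Dict.counter (arr.filter (fun x => decide (0 ≤ x)))).items
    Prod.fst Prod.snd false with hPI
  -- A's descending positive list is PI reversed
  have hrev : PySem.List.sorted2 (PySem.Dict.counter (arr.filter (fun x => decide (0 ≤ x)))).items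
      Prod.fst Prod.snd true = PI.reverse := by
    rw [sorted2_eq_sorted _ (counter_fst_nodup _), sorted_rev_eq_reverse _ (counter_fst_nodup _),
      hPI, sorted2_eq_sorted _ (counter_fst_nodup _)]
  rw [hrev]
  -- sizes
  have hsizeP : ((arr.filter (fun x => decide (0 ≤ x))).length : Int) = cnts PI :=
    (cnts_sorted2_counter _).symm
  have hsizeN : ((arr.filter (fun x => decide (x < 0))).length : Int) = cnts NI :=
    (cnts_sorted2_counter _).symm
  rw [hsizeP, hsizeN]
  -- B's scalar parameters
  have hsAll : (NI ++ PI).Pairwise (fun a b : Int × Int => a.1 < b.1) := by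
    rw [List.pairwise_append]
    exact ⟨sorted2_counter_pairwise _, sorted2_counter_pairwise _,
      fun a ha b hb => lt_of_lt_of_le (neg_keys arr a ha) (pos_keys arr b hb)⟩
  have hn : ((prefixes (NI ++ PI)).1.getD (NI ++ PI).length 0) = cnts NI + cnts PI := by
    rw [prefixes_fst_getD _ _ (le_refl _), List.take_length, cnts_append]
  rw [hn]
  rw [show (NI.map Prod.snd).sum = cnts NI from rfl]
  rw [show cnts NI + cnts PI - cnts NI = cnts PI by ring]
  -- initial totals agree
  have htotB : absSum (NI ++ PI) (prefixes (NI ++ PI)).1 (prefixes (NI ++ PI)).2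
      0 (NI ++ PI).length 0 = aSum 0 NI + aSum 0 PI := by
    rw [absSum_spec _ hsAll 0 _ (by omega) (le_refl _) 0, Nat.sub_zero, List.drop_zero,
      List.take_length, aSum_append]
  have htotA : (arr.map (fun e => |e|)).sum = aSum 0 NI + aSum 0 PI := by
    rw [hNI, hPI, aSum_sorted2_counter, aSum_sorted2_counter]
    have h := map_sum_filter_split arr (fun x => |x + 0|)
    simp only [add_zero] at h ⊢
    omega
  rw [htotB, htotA]
  -- run the three-state simulation
  have hinit : PVRel NI PI
      (NI, PI.reverse, cnts PI, cnts NI, aSum 0 NI + aSum 0 PI, 0, [])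
      (0, aSum 0 NI + aSum 0 PI, 0, []) :=
    ⟨rfl, rfl, rfl, Or.inl ⟨rfl, rfl, rfl, rfl, rfl⟩⟩
  exact (foldl_rel NI PI (sorted2_counter_pairwise _) (sorted2_counter_pairwise _)
    (sorted2_counter_counts _) (sorted2_counter_counts _) (neg_keys arr) (pos_keys arr)
    queries _ _ hinit).2.2.1
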